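-- pv_equiv track=rewrite | github.com/yuripbong/Algorithm | 프로그래머스/0/120836. 순서쌍의 개수/순서쌍의 개수.py | solution
-- ===== SOURCE A (Python) =====
-- def solution(n):
--     answer = 0
--
--     n_list = []
--     for i in range(1, n+1):
--         if n % i == 0:
--             n_list.append(i)
--
--     for i in n_list:
--         for j in range(len(n_list)):
--             if i * n_list[j] == n:
--                 answer += 1
--
--     return answer
-- ===== SOURCE B (Python) =====
-- def solution(n):
--     count = 0
--     i = 1
--     while i * i <= n:
--         if n % i == 0:
--             count += 2 if i * i < n else 1
--         i += 1
--     return count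
-- ===== Notes on version B (the rewrite author's own statement) =====
-- stated objective: faster
-- what changed: B counts divisors by trial division up to sqrt(n) (each small divisor i pairs with n//i), instead of A's O(n) scan building the divisor list followed by a quadratic double loop over it.
import Mathlib
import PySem

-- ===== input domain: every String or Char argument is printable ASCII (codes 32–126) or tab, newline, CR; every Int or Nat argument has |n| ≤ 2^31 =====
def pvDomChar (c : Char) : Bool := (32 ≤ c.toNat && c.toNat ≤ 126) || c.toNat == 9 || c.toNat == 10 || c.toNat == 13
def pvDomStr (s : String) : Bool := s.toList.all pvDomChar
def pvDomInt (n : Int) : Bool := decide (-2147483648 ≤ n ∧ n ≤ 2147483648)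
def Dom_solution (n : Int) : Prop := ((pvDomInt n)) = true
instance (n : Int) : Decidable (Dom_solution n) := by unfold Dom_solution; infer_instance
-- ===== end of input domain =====

-- B counts divisors by trial division up to sqrt(n), pairing each small divisor with its cofactor,
-- instead of A's O(n) scan building the divisor list followed by a quadratic double loop over it (faster).

-- ===== PORT A =====
def solution (n : Int) : Int :=
  -- n_list = []; for i in range(1, n+1): if n % i == 0: n_list.append(i)
  let nList : List Int := (PySem.List.pyRange 1 (n + 1) 1).foldl
    (fun acc i => if PySem.Int.mod n i == 0 then acc ++ [i] else acc) []
  -- for i in n_list: for j in range(len(n_list)): if i * n_list[j] == n: answer += 1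
  nList.foldl (fun answer i =>
    (PySem.List.pyRange 0 (nList.length : Int) 1).foldl
      (fun answer j => if i * PySem.List.pyGetD nList j 0 == n then answer + 1 else answer)
      answer) 0

-- ===== PORT B =====
-- while i * i <= n: (if n % i == 0: count += 2 if i*i < n else 1); i += 1
def solutionAltLoop (n i count : Int) : Int :=
  if h : i * i ≤ n then
    solutionAltLoop n (i + 1)
      (if PySem.Int.mod n i == 0 then
        count + (if i * i < n then 2 else 1)
      else count)
  else count
termination_by (n + 1 - i).toNat
decreasing_by
  have hin : i ≤ n := by nlinarith [sq_nonneg i, sq_nonneg (i - 1)]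
  omega

def solution_alt (n : Int) : Int := solutionAltLoop n 1 0

-- ===== PRECONDITION & SPEC =====
def Spec_solution (n : Int) (out : Int) : Prop := out = solution_alt n
instance (n : Int) (out : Int) : Decidable (Spec_solution n out) := by unfold Spec_solution; infer_instance

-- ===== CLAIM (what is proved, stated in full; the proofs are below) =====
def Claim_equal_solution : Prop := ∀ (n : Int), Dom_solution n → Spec_solution n (solution n)

-- ===== LEMMAS AND PROOFS =====

-- A's divisor list
def pvL (n : Int) : List Int :=
  (PySem.List.pyRange 1 (n + 1) 1).filter (fun i => PySem.Int.mod n i == 0)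

-- the integer interval [a, b] as a (computable) finset
def pvI (a b : Int) : Finset Int := (PySem.List.pyRange a (b + 1) 1).toFinset

-- the divisors of n in [1, n], as a finset
def pvD (n : Int) : Finset Int := (pvI 1 n).filter (fun d => d ∣ n)

theorem pvI_mem (a b d : Int) : d ∈ pvI a b ↔ a ≤ d ∧ d ≤ b := by
  simp [pvI, PySem.List.mem_pyRange_one]

-- B's per-iteration contribution
def pvW (n d : Int) : Int :=
  if PySem.Int.mod n d == 0 then (if d * d < n then 2 else 1) else 0

-- integer square root used only in the proofs
def pvSqrt (n : Int) : Int := (Nat.sqrt n.toNat : Int)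

theorem pvSqrt_nonneg (n : Int) : 0 ≤ pvSqrt n := by
  simp [pvSqrt]

theorem pvSqrt_le (n : Int) (hn : 0 ≤ n) : pvSqrt n * pvSqrt n ≤ n := by
  have h : n.toNat.sqrt * n.toNat.sqrt ≤ n.toNat := by
    simpa [pow_two] using Nat.sqrt_le' n.toNat
  have : ((Nat.sqrt n.toNat * Nat.sqrt n.toNat : Nat) : Int) ≤ ((n.toNat : Nat) : Int) := by
    exact_mod_cast h
  simpa [pvSqrt, Int.toNat_of_nonneg hn] using this

theorem pvSqrt_lt (n : Int) (hn : 0 ≤ n) : n < (pvSqrt n + 1) * (pvSqrt n + 1) := by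
  have h : n.toNat < (n.toNat.sqrt + 1) * (n.toNat.sqrt + 1) := by
    simpa [pow_two, Nat.succ_eq_add_one] using Nat.lt_succ_sqrt' n.toNat
  have : ((n.toNat : Nat) : Int) < (((Nat.sqrt n.toNat + 1) * (Nat.sqrt n.toNat + 1) : Nat) : Int) := by
    exact_mod_cast h
  simpa [pvSqrt, Int.toNat_of_nonneg hn] using this

theorem pv_le_sqrt_iff (n i : Int) (hn : 0 ≤ n) (hi : 1 ≤ i) :
    i * i ≤ n ↔ i ≤ pvSqrt n := by
  constructor
  · intro h
    by_contra hc
    push Not at hc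
    have h1 : pvSqrt n + 1 ≤ i := by omega
    have h0 : 0 ≤ pvSqrt n := pvSqrt_nonneg n
    nlinarith [pvSqrt_lt n hn]
  · intro h
    nlinarith [pvSqrt_le n hn]

theorem pvL_mem (n i : Int) : i ∈ pvL n ↔ 1 ≤ i ∧ i ≤ n ∧ i ∣ n := by
  simp [pvL, PySem.List.mem_pyRange_one, PySem.Int.mod_eq_zero_iff_dvd]
  omega

theorem pvL_nodup (n : Int) : (pvL n).Nodup :=
  (PySem.List.nodup_pyRange_one 1 (n + 1)).filter _

theorem pv_countP_eq_one (n i : Int) (hn : 1 ≤ n) (hi : i ∈ pvL n) :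
    (pvL n).countP (fun d => i * d == n) = 1 := by
  rw [pvL_mem] at hi
  obtain ⟨hi1, hin, hdvd⟩ := hi
  have hie : i * (n / i) = n := Int.mul_ediv_cancel' hdvd
  have he1 : 1 ≤ n / i := by nlinarith
  have hen : n / i ≤ n := by nlinarith
  have hedvd : (n / i) ∣ n := ⟨i, (Int.ediv_mul_cancel hdvd).symm⟩
  have hmem : n / i ∈ pvL n := (pvL_mem n (n / i)).2 ⟨he1, hen, hedvd⟩
  have hcp : (pvL n).countP (fun d => i * d == n) = (pvL n).countP (fun d => d == n / i) := by
    apply List.countP_congr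
    intro x _
    simp only [beq_iff_eq]
    constructor
    · intro hx
      exact mul_left_cancel₀ (by omega : i ≠ 0) (by rw [hie, hx])
    · intro hx
      rw [hx, hie]
  rw [hcp]
  exact List.count_eq_one_of_mem (pvL_nodup n) hmem

theorem pv_solution_eq_len (n : Int) (hn : 1 ≤ n) :
    solution n = ((pvL n).length : Int) := by
  show (((PySem.List.pyRange 1 (n + 1) 1).foldl
      (fun acc i => if PySem.Int.mod n i == 0 then acc ++ [i] else acc) []).foldl _ 0) = _
  rw [PySem.List.foldl_append_if_eq_filter, List.nil_append]
  have hL : (PySem.List.pyRange 1 (n + 1) 1).filter (fun i => PySem.Int.mod n i == 0) = pvL n := rfl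
  rw [hL]
  have hinner : ∀ (i acc : Int),
      (PySem.List.pyRange 0 ((pvL n).length : Int) 1).foldl
        (fun answer j => if i * PySem.List.pyGetD (pvL n) j 0 == n then answer + 1 else answer) acc
      = acc + (((pvL n).countP (fun d => i * d == n) : Nat) : Int) := by
    intro i acc
    rw [PySem.List.foldl_pyRange_zero_pyGetD' (pvL n) 0
      (fun answer x => if i * x == n then answer + 1 else answer) acc]
    exact PySem.List.foldl_count_if (fun d => i * d == n) (pvL n) acc
  simp only [hinner]
  rw [PySem.List.foldl_add (pvL n) (fun i => (((pvL n).countP (fun d => i * d == n) : Nat) : Int)) 0]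
  rw [List.map_congr_left (fun i hi => by
    rw [pv_countP_eq_one n i hn hi]; rfl : ∀ i ∈ pvL n,
      (((pvL n).countP (fun d => i * d == n) : Nat) : Int) = (fun _ => (1 : Int)) i)]
  rw [PySem.List.sum_map_const_int (pvL n) 1]
  ring

theorem pvL_toFinset (n : Int) : (pvL n).toFinset = pvD n := by
  ext d
  simp [pvL_mem, pvD, pvI_mem]
  tauto

theorem pv_len_eq_card (n : Int) : ((pvL n).length : Int) = ((pvD n).card : Int) := by
  rw [← pvL_toFinset, List.toFinset_card_of_nodup (pvL_nodup n)]

theorem pv_loop_sum (n : Int) (hn : 0 ≤ n) :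
    ∀ (k : Nat) (i c : Int), 1 ≤ i → (n + 1 - i).toNat = k →
      solutionAltLoop n i c = c + ((PySem.List.pyRange i (pvSqrt n + 1) 1).map (pvW n)).sum := by
  intro k
  induction k using Nat.strong_induction_on with
  | _ k ih =>
    intro i c hi hk
    rw [solutionAltLoop]
    by_cases h : i * i ≤ n
    · rw [dif_pos h]
      have hin : i ≤ n := by nlinarith [sq_nonneg i, sq_nonneg (i - 1)]
      have his : i ≤ pvSqrt n := (pv_le_sqrt_iff n i hn hi).1 h
      rw [ih (n + 1 - (i + 1)).toNat (by omega) (i + 1) _ (by omega) rfl]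
      rw [PySem.List.pyRange_one_cons (by omega : i < pvSqrt n + 1)]
      simp only [List.map_cons, List.sum_cons]
      unfold pvW
      split_ifs <;> ring
    · rw [dif_neg h]
      have hgt : pvSqrt n < i := by
        by_contra hc
        push Not at hc
        exact h ((pv_le_sqrt_iff n i hn hi).2 hc)
      rw [PySem.List.pyRange_one_eq_nil (by omega)]
      simp

theorem pvD_mem (n d : Int) : d ∈ pvD n ↔ 1 ≤ d ∧ d ≤ n ∧ d ∣ n := by
  simp [pvD, pvI_mem, Finset.mem_filter]
  tauto

theorem pv_cofactor (n d : Int) (hn : 1 ≤ n) (hd1 : 1 ≤ d) (hdvd : d ∣ n) :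
    1 ≤ n / d ∧ n / d ≤ n ∧ (n / d) ∣ n ∧ d * (n / d) = n ∧ n / (n / d) = d := by
  have hie : d * (n / d) = n := Int.mul_ediv_cancel' hdvd
  have he1 : 1 ≤ n / d := by nlinarith
  have hen : n / d ≤ n := by nlinarith
  refine ⟨he1, hen, ⟨d, (Int.ediv_mul_cancel hdvd).symm⟩, hie, ?_⟩
  have h2 : d * (n / d) / (n / d) = d := Int.mul_ediv_cancel d (by omega : n / d ≠ 0)
  nth_rewrite 1 [← hie]
  exact h2

theorem pv_small_of_large (n d : Int) (hn : 1 ≤ n) (hd1 : 1 ≤ d) (hdvd : d ∣ n)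
    (hlarge : n < d * d) : (n / d) * (n / d) < n := by
  obtain ⟨he1, _, _, hie, _⟩ := pv_cofactor n d hn hd1 hdvd
  have hed : n / d < d := lt_of_mul_lt_mul_left (by omega : d * (n / d) < d * d) (by omega : (0:Int) ≤ d)
  have h3 : (n / d) * (n / d) < (n / d) * d := mul_lt_mul_of_pos_left hed (by omega : (0:Int) < n / d)
  have h4 : (n / d) * d = n := by rw [mul_comm]; exact hie
  omega

theorem pv_large_of_small (n e : Int) (hn : 1 ≤ n) (he1 : 1 ≤ e) (hedvd : e ∣ n)
    (hsmall : e * e < n) : n < (n / e) * (n / e) := by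
  obtain ⟨hd1, _, _, hie, _⟩ := pv_cofactor n e hn he1 hedvd
  have hed : e < n / e := lt_of_mul_lt_mul_left (by omega : e * e < e * (n / e)) (by omega : (0:Int) ≤ e)
  have h3 : (n / e) * e < (n / e) * (n / e) := mul_lt_mul_of_pos_left hed (by omega : (0:Int) < n / e)
  have h4 : (n / e) * e = n := by rw [mul_comm]; exact hie
  omega

theorem pv_bij (n : Int) (hn : 1 ≤ n) :
    ((pvD n).filter (fun d => ¬ d * d ≤ n)).card
      = ((pvD n).filter (fun d => d * d < n)).card := by
  apply Finset.card_bij' (i := fun d _ => n / d) (j := fun e _ => n / e)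
  · intro d hd
    rw [Finset.mem_filter, pvD_mem] at hd
    obtain ⟨⟨hd1, hdn, hdvd⟩, hlarge⟩ := hd
    obtain ⟨he1, hen, hedvd, _, _⟩ := pv_cofactor n d hn hd1 hdvd
    rw [Finset.mem_filter, pvD_mem]
    exact ⟨⟨he1, hen, hedvd⟩, pv_small_of_large n d hn hd1 hdvd (by omega)⟩
  · intro e he
    rw [Finset.mem_filter, pvD_mem] at he
    obtain ⟨⟨he1, hen, hedvd⟩, hsmall⟩ := he
    obtain ⟨hd1, hdn, hdvd, _, _⟩ := pv_cofactor n e hn he1 hedvd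
    rw [Finset.mem_filter, pvD_mem]
    have := pv_large_of_small n e hn he1 hedvd hsmall
    exact ⟨⟨hd1, hdn, hdvd⟩, by omega⟩
  · intro d hd
    rw [Finset.mem_filter, pvD_mem] at hd
    obtain ⟨⟨hd1, _, hdvd⟩, _⟩ := hd
    exact (pv_cofactor n d hn hd1 hdvd).2.2.2.2
  · intro e he
    rw [Finset.mem_filter, pvD_mem] at he
    obtain ⟨⟨he1, _, hedvd⟩, _⟩ := he
    exact (pv_cofactor n e hn he1 hedvd).2.2.2.2

theorem pv_core (n : Int) (hn : 1 ≤ n) :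
    ∑ d ∈ pvI 1 (pvSqrt n), pvW n d = ((pvD n).card : Int) := by
  have hW : ∀ d : Int, pvW n d = if d ∣ n then (if d * d < n then (2:Int) else 1) else 0 := by
    intro d
    by_cases hd : d ∣ n <;> simp [pvW, PySem.Int.mod_eq_zero_iff_dvd, hd]
  have h1 : ∑ d ∈ pvI 1 (pvSqrt n), pvW n d
      = ∑ d ∈ (pvI 1 (pvSqrt n)).filter (fun d => d ∣ n), (if d * d < n then (2:Int) else 1) := by
    rw [Finset.sum_filter]
    exact Finset.sum_congr rfl (fun d _ => hW d)
  have hsmall : (pvI 1 (pvSqrt n)).filter (fun d => d ∣ n)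
      = (pvD n).filter (fun d => d * d ≤ n) := by
    ext d
    simp only [Finset.mem_filter, pvD_mem, pvI_mem]
    constructor
    · rintro ⟨⟨hd1, hds⟩, hdvd⟩
      have hdd : d * d ≤ n := (pv_le_sqrt_iff n d (by omega) hd1).2 hds
      have hdn : d ≤ n := by nlinarith
      exact ⟨⟨hd1, hdn, hdvd⟩, hdd⟩
    · rintro ⟨⟨hd1, hdn, hdvd⟩, hdd⟩
      exact ⟨⟨hd1, (pv_le_sqrt_iff n d (by omega) hd1).1 hdd⟩, hdvd⟩
  have h2 : ∑ d ∈ (pvD n).filter (fun d => d * d ≤ n), (if d * d < n then (2:Int) else 1)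
      = (((pvD n).filter (fun d => d * d ≤ n)).card : Int)
        + ((((pvD n).filter (fun d => d * d ≤ n)).filter (fun d => d * d < n)).card : Int) := by
    have hsplit : ∀ d : Int, (if d * d < n then (2:Int) else 1) = 1 + (if d * d < n then 1 else 0) := by
      intro d; split_ifs <;> ring
    rw [Finset.sum_congr rfl (fun d _ => hsplit d), Finset.sum_add_distrib,
      Finset.sum_const, Finset.sum_boole]
    simp
  have h3 : ((pvD n).filter (fun d => d * d ≤ n)).filter (fun d => d * d < n)
      = (pvD n).filter (fun d => d * d < n) := by
    rw [Finset.filter_filter]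
    exact Finset.filter_congr (fun d _ => by
      constructor
      · rintro ⟨_, h⟩; exact h
      · intro h; exact ⟨le_of_lt h, h⟩)
  have hcard := Finset.card_filter_add_card_filter_not (s := pvD n) (p := fun d => d * d ≤ n)
  have hbij := pv_bij n hn
  rw [h1, hsmall, h2, h3]
  omega

theorem pv_listsum (n s : Int) :
    ((PySem.List.pyRange 1 (s + 1) 1).map (pvW n)).sum = ∑ d ∈ pvI 1 s, pvW n d :=
  (List.sum_toFinset _ (PySem.List.nodup_pyRange_one 1 (s + 1))).symm

theorem pv_neg (n : Int) (hn : n ≤ 0) : solution n = 0 ∧ solution_alt n = 0 := by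
  constructor
  · simp [solution, PySem.List.pyRange_one_eq_nil (by omega : n + 1 ≤ 1)]
  · rw [solution_alt, solutionAltLoop]
    simp
    omega

-- ===== VERDICT (by name: the statement is the Claim_ definition above) =====
theorem solution_spec : Claim_equal_solution := by
  intro n _
  unfold Spec_solution
  rcases le_or_gt n 0 with hn | hn
  · have h := pv_neg n hn
    rw [h.1, h.2]
  · have hn1 : 1 ≤ n := hn
    have hn0 : 0 ≤ n := by omega
    rw [pv_solution_eq_len n hn1, pv_len_eq_card n,
      solution_alt, pv_loop_sum n hn0 (n + 1 - 1).toNat 1 0 le_rfl rfl,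
      pv_listsum n (pvSqrt n), pv_core n hn1, zero_add]
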